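-- pv_equiv track=rewrite | github.com/AlbinCayanan/socket | crc.py | verify_packet
-- ===== SOURCE A (Python) =====
-- GEN_POL = '1011'
--
-- def xor(a, b):
--     result = []
--     for i in range(1, len(b)):
--         result.append('0' if a[i] == b[i] else '1')
--     return ''.join(result)
--
-- def crc_division(data):
--     n = len(GEN_POL)
--     dividend = data + '0'*(n-1)
--     temp = dividend[:n]
--
--     for i in range(len(data)):
--         if temp[0] == '1':
--             temp = xor(temp, GEN_POL) + dividend[n+i:n+i+1]
--         else:
--             temp = xor(temp, '0'*n) + dividend[n+i:n+i+1]
--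
--     remainder = temp[:n-1]
--     return remainder
--
-- def verify_packet(packet):
--     try:
--         message, received_crc = packet.split('|')
--         message_ascii = ''.join(format(ord(c), '08b') for c in message)
--         calculated_crc = crc_division(message_ascii)
--
--         if calculated_crc == received_crc:
--             return True, message
--         else:
--             return False, None
--     except:
--         return False, None
-- ===== SOURCE B (Python) =====
-- # Table-driven CRC-3 (poly 0b1011): one lookup per character instead of bit-by-bit string division.
-- def _crc3_byte(x):
--     r = x << 3
--     for bit in range(10, 2, -1):
--         if (r >> bit) & 1:
--             r ^= 0b1011 << (bit - 3)
--     return r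
--
-- _TABLE = [_crc3_byte(x) for x in range(256)]
--
-- def verify_packet(packet):
--     parts = packet.split('|')
--     if len(parts) != 2:
--         return False, None
--     message, received_crc = parts
--     rem = 0
--     for c in message:
--         rem = _TABLE[((rem << 5) ^ ord(c)) & 0xFF]
--     if format(rem, '03b') == received_crc:
--         return True, message
--     return False, None
-- ===== Notes on version B (the rewrite author's own statement) =====
-- stated objective: faster
-- what changed: Replaces the bit-by-bit augmented string division (building a new 4-char string per message bit) with a precomputed 256-entry CRC-3 lookup table and an integer remainder register updated once per character, formatted to 3 bits only at the end.
import Mathlib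
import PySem

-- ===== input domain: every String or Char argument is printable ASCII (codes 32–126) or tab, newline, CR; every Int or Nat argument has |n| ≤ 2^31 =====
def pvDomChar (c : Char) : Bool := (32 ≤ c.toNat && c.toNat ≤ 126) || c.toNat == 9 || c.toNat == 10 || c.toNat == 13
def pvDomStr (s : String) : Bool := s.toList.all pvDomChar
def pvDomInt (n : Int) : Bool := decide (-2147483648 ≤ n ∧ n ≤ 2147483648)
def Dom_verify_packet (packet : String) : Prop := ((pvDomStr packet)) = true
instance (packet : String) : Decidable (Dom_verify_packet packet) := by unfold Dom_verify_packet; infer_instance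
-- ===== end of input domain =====

-- B replaces A's bit-by-bit augmented string division with a 256-entry CRC-3 lookup table and an
-- integer remainder register updated once per character (objective: faster, constant-factor).

-- shared helper: format(n, 'b') — binary digits of n, no padding (fuel-structural so the kernel reduces it)
def pvABinCore : Nat → Nat → List Char → List Char
  | 0, _, acc => acc
  | fuel + 1, n, acc => if n == 0 then acc else pvABinCore fuel (n / 2) ((if n % 2 == 1 then '1' else '0') :: acc)

def pvABin (n : Nat) : List Char := if n == 0 then ['0'] else pvABinCore n n []

-- shared helper: format(n, '0<w>b') — binary, left-padded with '0' to width w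
def pvAFormat (n w : Nat) : List Char := List.replicate (w - (pvABin n).length) '0' ++ pvABin n

-- ===== PORT A =====
def genPol : List Char := ['1', '0', '1', '1']          -- GEN_POL = '1011'

-- def xor(a, b): a[i] is in range whenever A reaches this call, so pyGetD's default is never read
def pyXorA (a b : List Char) : List Char :=
  (PySem.List.pyRange 1 (b.length : Int) 1).foldl
    (fun result i =>
      result ++ [if PySem.List.pyGetD a i ' ' == PySem.List.pyGetD b i ' ' then '0' else '1']) []

-- the body of crc_division's for-loop (temp[0] is in range whenever the loop runs; default never read)
def crcLoopBody (dividend : List Char) (temp : List Char) (i : Int) : List Char :=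
  if PySem.List.pyGetD temp 0 ' ' == '1' then
    pyXorA temp genPol ++ PySem.List.slice dividend (some (4 + i)) (some (4 + i + 1))
  else
    pyXorA temp (List.replicate 4 '0') ++ PySem.List.slice dividend (some (4 + i)) (some (4 + i + 1))

def crc_division (data : List Char) : List Char :=
  let n : Nat := genPol.length
  let dividend := data ++ List.replicate (n - 1) '0'
  let temp := PySem.List.slice dividend none (some (n : Int))
  let temp := (PySem.List.pyRange 0 (data.length : Int) 1).foldl (crcLoopBody dividend) temp
  PySem.List.slice temp none (some ((n : Int) - 1))

-- try/except: the only statement that can raise on a well-typed input is the 2-tuple unpacking of split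
def verify_packet (packet : String) : Bool × Option String :=
  match PySem.Chars.splitOn packet.toList ['|'] with
  | [message, received_crc] =>
    let message_ascii := (message.map (fun c => pvAFormat c.toNat 8)).flatten
    let calculated_crc := crc_division message_ascii
    if calculated_crc == received_crc then (true, some (String.ofList message)) else (false, none)
  | _ => (false, none)

-- ===== PORT B =====
-- B's own copy of the format(n, '0<w>b') helper (not shared with port A)
def pvBBinCore : Nat → Nat → List Char → List Char
  | 0, _, acc => acc
  | fuel + 1, n, acc => if n == 0 then acc else pvBBinCore fuel (n / 2) ((if n % 2 == 1 then '1' else '0') :: acc)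

def pvBBin (n : Nat) : List Char := if n == 0 then ['0'] else pvBBinCore n n []

def pvBFormat (n w : Nat) : List Char := List.replicate (w - (pvBBin n).length) '0' ++ pvBBin n

def crc3_byte (x : Nat) : Nat :=
  (PySem.List.pyRange 10 2 (-1)).foldl
    (fun r bit =>                                        -- bit runs over 10..3, so bit.toNat is exact
      if (r >>> bit.toNat) &&& 1 == 1 then r ^^^ (11 <<< (bit.toNat - 3)) else r)
    (x <<< 3)

def crcTable : List Nat := (List.range 256).map crc3_byte

def verify_packet_alt (packet : String) : Bool × Option String :=
  let parts := PySem.Chars.splitOn packet.toList ['|']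
  if parts.length == 2 then
    let message := parts.getD 0 []
    let received_crc := parts.getD 1 []
    let rem := message.foldl (fun r c => crcTable.getD (((r <<< 5) ^^^ c.toNat) &&& 255) 0) 0
    if pvBFormat rem 3 == received_crc then (true, some (String.ofList message)) else (false, none)
  else (false, none)

-- ===== PRECONDITION & SPEC =====
def Spec_verify_packet (packet : String) (out : Bool × Option String) : Prop := out = verify_packet_alt packet
instance (packet : String) (out : Bool × Option String) : Decidable (Spec_verify_packet packet out) := by unfold Spec_verify_packet; infer_instance

-- ===== CLAIM (what is proved, stated in full; the proofs are below) =====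
def Claim_equal_verify_packet : Prop := ∀ (packet : String), Dom_verify_packet packet → Spec_verify_packet packet (verify_packet packet)

-- ===== LEMMAS AND PROOFS =====

-- semantic model: a 3-bit CRC register folded over the bit characters
def bitv (c : Char) : Nat := if c == '1' then 1 else 0
def red (r : Nat) : Nat := if 8 ≤ r then r ^^^ 11 else r
def step3 (r : Nat) (c : Char) : Nat := red (2 * r + bitv c)
def gstep (r : Nat) (c : Char) : Nat := 2 * red r + bitv c
def crcBits (bits : List Char) : Nat := (bits ++ ['0', '0', '0']).foldl step3 0

def IsBin (l : List Char) : Prop := ∀ c ∈ l, c = '0' ∨ c = '1'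

lemma red_lt : ∀ r : Fin 16, red r < 8 := by decide

lemma bitv_le (c : Char) : bitv c ≤ 1 := by
  unfold bitv; split <;> omega

lemma step3_lt {r : Nat} (hr : r < 8) (c : Char) : step3 r c < 8 := by
  have h1 : 2 * r + bitv c < 16 := by have := bitv_le c; omega
  exact red_lt ⟨2 * r + bitv c, h1⟩

lemma foldl_step3_lt {r : Nat} (hr : r < 8) (l : List Char) : l.foldl step3 r < 8 := by
  induction l generalizing r with
  | nil => exact hr
  | cons c t ih => exact ih (step3_lt hr c)

lemma gstep_lt {r : Nat} (hr : r < 16) (c : Char) : gstep r c < 16 := by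
  have h1 : red r < 8 := by simpa using red_lt ⟨r, hr⟩
  have := bitv_le c
  simp only [gstep]; omega

lemma foldl_step3_red (l : List Char) : ∀ r : Nat, l.foldl step3 (red r) = red (l.foldl gstep r) := by
  induction l with
  | nil => intro r; rfl
  | cons c t ih =>
    intro r
    show t.foldl step3 (step3 (red r) c) = red ((c :: t).foldl gstep r)
    have h : step3 (red r) c = red (gstep r c) := rfl
    rw [h]
    exact ih (gstep r c)

-- the A-side loop step on a 4-bit register, computed once for each of the 16 register values
lemma stepA_red : ∀ r : Fin 16,
    (if PySem.List.pyGetD (pvAFormat r 4) 0 ' ' == '1'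
     then pyXorA (pvAFormat r 4) genPol
     else pyXorA (pvAFormat r 4) (List.replicate 4 '0')) = pvAFormat (red r) 3 := by decide

lemma append_bit : ∀ s : Fin 8, ∀ b : Char, b = '0' ∨ b = '1' →
    pvAFormat s 3 ++ [b] = pvAFormat (2 * s + bitv b) 4 := by
  intro s b hb
  rcases hb with h | h <;> subst h <;> revert s <;> decide

lemma take3_format : ∀ s : Fin 8, PySem.List.slice (pvAFormat s 3) none (some ((4 : Int) - 1)) = pvAFormat s 3 := by
  decide

lemma slice_one (xs : List Char) (a : Nat) :
    PySem.List.slice xs (some ((4 : Int) + a)) (some (4 + a + 1)) = (xs.drop (4 + a)).take 1 := by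
  have h := PySem.List.slice_toNat xs (a := (4 : Int) + a) (b := 4 + a + 1) (by omega) (by omega)
  rw [h]
  congr 1
  omega

lemma foldl_gstep_lt {r : Nat} (hr : r < 16) (l : List Char) : l.foldl gstep r < 16 := by
  induction l generalizing r with
  | nil => exact hr
  | cons c t ih => exact ih (gstep_lt hr c)

lemma loopA (dividend : List Char) (hbin : IsBin dividend) :
    ∀ (rest : List Char) (a : Nat) (r : Nat), r < 16 →
    dividend.drop (4 + a) = rest →
    (a : Int) + rest.length + 4 = dividend.length →
    (PySem.List.pyRange (a : Int) ((dividend.length : Int) - 3) 1).foldl (crcLoopBody dividend) (pvAFormat r 4)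
      = pvAFormat (red (rest.foldl gstep r)) 3 := by
  intro rest
  induction rest with
  | nil =>
    intro a r hr hdrop hL
    have hrange : ((dividend.length : Int) - 3) = (a : Int) + 1 := by
      simp only [List.length_nil, Nat.cast_zero] at hL; omega
    rw [hrange, PySem.List.pyRange_one_singleton]
    show crcLoopBody dividend (pvAFormat r 4) (a : Int) = _
    unfold crcLoopBody
    have hA : (if PySem.List.pyGetD (pvAFormat r 4) 0 ' ' == '1'
        then pyXorA (pvAFormat r 4) genPol
        else pyXorA (pvAFormat r 4) (List.replicate 4 '0')) = pvAFormat (red r) 3 := stepA_red ⟨r, hr⟩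
    rw [← apply_ite (· ++ PySem.List.slice dividend (some (4 + (a : Int))) (some (4 + (a : Int) + 1))),
      hA, slice_one, hdrop]
    simp
  | cons b rest' ih =>
    intro a r hr hdrop hL
    have hb : b = '0' ∨ b = '1' := by
      have h1 : b ∈ dividend.drop (4 + a) := by rw [hdrop]; exact List.mem_cons_self
      exact hbin b (List.mem_of_mem_drop h1)
    have hlt : (a : Int) < (dividend.length : Int) - 3 := by
      simp only [List.length_cons] at hL; push_cast at hL ⊢; omega
    rw [PySem.List.pyRange_one_cons hlt, List.foldl_cons]
    have hstep : crcLoopBody dividend (pvAFormat r 4) (a : Int) = pvAFormat (gstep r b) 4 := by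
      unfold crcLoopBody
      have hA : (if PySem.List.pyGetD (pvAFormat r 4) 0 ' ' == '1'
          then pyXorA (pvAFormat r 4) genPol
          else pyXorA (pvAFormat r 4) (List.replicate 4 '0')) = pvAFormat (red r) 3 := stepA_red ⟨r, hr⟩
      rw [← apply_ite (· ++ PySem.List.slice dividend (some (4 + (a : Int))) (some (4 + (a : Int) + 1))),
        hA, slice_one, hdrop]
      show pvAFormat (red r) 3 ++ [b] = _
      have h8 : red r < 8 := by simpa using red_lt ⟨r, hr⟩
      have hab : pvAFormat (red r) 3 ++ [b] = pvAFormat (2 * red r + bitv b) 4 := append_bit ⟨red r, h8⟩ b hb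
      rw [hab]; rfl
    rw [hstep]
    have hdrop' : dividend.drop (4 + (a + 1)) = rest' := by
      have : dividend.drop (4 + a + 1) = (dividend.drop (4 + a)).drop 1 := by
        rw [List.drop_drop]
      rw [show 4 + (a + 1) = 4 + a + 1 by omega, this, hdrop, List.drop_one, List.tail_cons]
    have hL' : ((a + 1 : Nat) : Int) + rest'.length + 4 = dividend.length := by
      simp only [List.length_cons] at hL; push_cast at hL ⊢; omega
    have := ih (a + 1) (gstep r b) (gstep_lt hr b) hdrop' hL'
    rw [show ((a + 1 : Nat) : Int) = (a : Int) + 1 by push_cast; ring] at this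
    rw [this, List.foldl_cons]

lemma bits4_format : ∀ b0 b1 b2 b3 : Char,
    b0 = '0' ∨ b0 = '1' → b1 = '0' ∨ b1 = '1' → b2 = '0' ∨ b2 = '1' → b3 = '0' ∨ b3 = '1' →
    [b0, b1, b2, b3] = pvAFormat (8 * bitv b0 + 4 * bitv b1 + 2 * bitv b2 + bitv b3) 4 := by
  intro b0 b1 b2 b3 h0 h1 h2 h3
  rcases h0 with h | h <;> subst h <;> rcases h1 with h | h <;> subst h <;>
    rcases h2 with h | h <;> subst h <;> rcases h3 with h | h <;> subst h <;> decide

lemma fold4_step3 : ∀ b0 b1 b2 b3 : Char,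
    b0 = '0' ∨ b0 = '1' → b1 = '0' ∨ b1 = '1' → b2 = '0' ∨ b2 = '1' → b3 = '0' ∨ b3 = '1' →
    step3 (step3 (step3 (step3 0 b0) b1) b2) b3
      = red (8 * bitv b0 + 4 * bitv b1 + 2 * bitv b2 + bitv b3) := by
  intro b0 b1 b2 b3 h0 h1 h2 h3
  rcases h0 with h | h <;> subst h <;> rcases h1 with h | h <;> subst h <;>
    rcases h2 with h | h <;> subst h <;> rcases h3 with h | h <;> subst h <;> decide

lemma list4_of_len {l : List Char} (h : 4 ≤ l.length) :
    ∃ b0 b1 b2 b3 t, l = b0 :: b1 :: b2 :: b3 :: t := by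
  rcases l with _ | ⟨b0, _ | ⟨b1, _ | ⟨b2, _ | ⟨b3, t⟩⟩⟩⟩ <;> simp at h ⊢

lemma crc_division_eq (data : List Char) (hbin : IsBin data) :
    crc_division data = pvAFormat (crcBits data) 3 := by
  rcases hdata : data with _ | ⟨c0, data'⟩
  · decide
  rw [← hdata]
  show PySem.List.slice
      ((PySem.List.pyRange 0 (data.length : Int) 1).foldl (crcLoopBody (data ++ ['0', '0', '0']))
        (PySem.List.slice (data ++ ['0', '0', '0']) none (some ((4 : Nat) : Int))))
      none (some ((4 : Int) - 1)) = pvAFormat (crcBits data) 3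
  have hbinD : IsBin (data ++ ['0', '0', '0']) := by
    intro c hc
    rcases List.mem_append.mp hc with h | h
    · exact hbin c h
    · simp at h; left; exact h
  have hlen4 : 4 ≤ (data ++ ['0', '0', '0']).length := by
    simp [hdata]
  obtain ⟨b0, b1, b2, b3, t, hshape⟩ := list4_of_len hlen4
  have hbinb : ∀ c ∈ [b0, b1, b2, b3], c = '0' ∨ c = '1' := by
    intro c hc
    refine hbinD c ?_
    rw [hshape]
    simp only [List.mem_cons, List.not_mem_nil, or_false] at hc ⊢
    tauto
  have hlent : data.length + 3 = t.length + 4 := by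
    have := congrArg List.length hshape
    simpa using this
  set r0 : Nat := 8 * bitv b0 + 4 * bitv b1 + 2 * bitv b2 + bitv b3 with hr0def
  have hr0 : r0 < 16 := by
    have := bitv_le b0; have := bitv_le b1; have := bitv_le b2; have := bitv_le b3
    omega
  have htake : PySem.List.slice (b0 :: b1 :: b2 :: b3 :: t) none (some ((4 : Nat) : Int)) = pvAFormat r0 4 := by
    rw [PySem.List.slice_to _ (by omega)]
    show [b0, b1, b2, b3] = _
    exact bits4_format b0 b1 b2 b3 (hbinb b0 (by simp)) (hbinb b1 (by simp)) (hbinb b2 (by simp))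
      (hbinb b3 (by simp))
  have hub : (data.length : Int) = (((b0 :: b1 :: b2 :: b3 :: t).length : Nat) : Int) - 3 := by
    simp only [List.length_cons]
    push_cast
    omega
  have hdrop4 : (b0 :: b1 :: b2 :: b3 :: t).drop (4 + 0) = t := rfl
  have hLcond : ((0 : Nat) : Int) + (t.length : Int) + 4 = ((b0 :: b1 :: b2 :: b3 :: t).length : Int) := by
    simp only [List.length_cons]
    push_cast
    omega
  have hloop := loopA (b0 :: b1 :: b2 :: b3 :: t) (hshape ▸ hbinD) t 0 r0 hr0 hdrop4 hLcond
  rw [hshape, htake, hub]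
  rw [show ((0 : Nat) : Int) = (0 : Int) from rfl] at hloop
  rw [hloop]
  have hfold : crcBits data = red (t.foldl gstep r0) := by
    unfold crcBits
    rw [hshape]
    simp only [List.foldl_cons]
    rw [fold4_step3 b0 b1 b2 b3 (hbinb b0 (by simp)) (hbinb b1 (by simp)) (hbinb b2 (by simp))
      (hbinb b3 (by simp))]
    exact foldl_step3_red t r0
  rw [hfold]
  have hred : red (t.foldl gstep r0) < 8 := by
    simpa using red_lt ⟨t.foldl gstep r0, foldl_gstep_lt hr0 t⟩
  have := take3_format ⟨red (t.foldl gstep r0), hred⟩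
  simpa using this

-- B-side: the table lookup absorbs one byte = eight bit-steps (checked for all 8 × 128 cases)
lemma table_getD {x : Nat} (hx : x < 256) : crcTable.getD x 0 = crc3_byte x := by
  unfold crcTable
  rw [List.getD_eq_getElem?_getD, List.getElem?_map, List.getElem?_range hx]
  rfl

set_option maxHeartbeats 4000000 in
set_option maxRecDepth 10000 in
lemma byte_fact : ∀ u : Fin 8, ∀ c : Fin 128,
    crc3_byte ((((['0', '0', '0'].foldl step3 u.val) <<< 5) ^^^ c.val) &&& 255)
      = (pvAFormat c.val 8 ++ ['0', '0', '0']).foldl step3 u.val := by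
  decide

lemma remB_eq (msg : List Char) (hm : ∀ c ∈ msg, c.toNat < 128) :
    msg.foldl (fun r c => crcTable.getD (((r <<< 5) ^^^ c.toNat) &&& 255) 0) 0
      = crcBits ((msg.map (fun c => pvAFormat c.toNat 8)).flatten) := by
  induction msg using List.reverseRecOn with
  | nil => decide
  | append_singleton msg c ih =>
    have hm' : ∀ ch ∈ msg, ch.toNat < 128 := fun ch h => hm ch (by simp [h])
    have hc : c.toNat < 128 := hm c (by simp)
    set B := (msg.map (fun c => pvAFormat c.toNat 8)).flatten with hBdef
    set u := B.foldl step3 0 with hudef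
    have hu : u < 8 := foldl_step3_lt (by omega) B
    have hcrcB : crcBits B = ['0', '0', '0'].foldl step3 u := by
      unfold crcBits; rw [List.foldl_append]
    have hidx : (((crcBits B) <<< 5) ^^^ c.toNat) &&& 255 < 256 := by
      have := Nat.and_le_right (n := ((crcBits B) <<< 5) ^^^ c.toNat) (m := 255)
      omega
    rw [List.foldl_append, List.foldl_cons, List.foldl_nil, ih hm']
    rw [table_getD hidx, hcrcB]
    have hbf := byte_fact ⟨u, hu⟩ ⟨c.toNat, hc⟩
    simp only at hbf
    rw [hbf]
    have hBc : (List.map (fun c => pvAFormat c.toNat 8) (msg ++ [c])).flatten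
        = B ++ pvAFormat c.toNat 8 := by
      rw [hBdef]
      simp
    rw [hBc]
    unfold crcBits
    rw [List.append_assoc, List.foldl_append, List.foldl_append, ← hudef]
    rw [List.foldl_append]

lemma pvABinCore_bin : ∀ fuel n acc, IsBin acc → IsBin (pvABinCore fuel n acc) := by
  intro fuel
  induction fuel with
  | zero => intro n acc h; exact h
  | succ f ih =>
    intro n acc h
    unfold pvABinCore
    split
    · exact h
    · refine ih _ _ ?_
      intro c hc
      rcases List.mem_cons.mp hc with h' | h'
      · subst h'; split
        · right; rfl
        · left; rfl
      · exact h c h'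

lemma pvAFormat_bin (n w : Nat) : IsBin (pvAFormat n w) := by
  intro c hc
  unfold pvAFormat at hc
  rcases List.mem_append.mp hc with h | h
  · left; exact List.eq_of_mem_replicate h
  · unfold pvABin at h
    split at h
    · left; simpa using h
    · exact pvABinCore_bin _ _ _ (by intro c h; cases h) c h

-- every character of every part of splitOn comes from the original string (or the accumulators)
lemma splitOn_go_chars (sep : List Char) :
    ∀ (fuel : Nat) (l cur : List Char) (acc : List (List Char)) (p : List Char),
      p ∈ PySem.Chars.splitOn.go sep fuel l cur acc → ∀ c ∈ p, c ∈ l ∨ c ∈ cur ∨ c ∈ acc.flatten := by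
  intro fuel
  induction fuel with
  | zero =>
    intro l cur acc p hp c hc
    simp only [PySem.Chars.splitOn.go, List.mem_reverse] at hp
    rcases List.mem_cons.mp hp with h | h
    · subst h
      rcases List.mem_append.mp hc with h | h
      · right; left; simpa using h
      · left; exact h
    · right; right; exact List.mem_flatten.mpr ⟨p, h, hc⟩
  | succ f ih =>
    intro l cur acc p hp c hc
    rcases l with _ | ⟨x, rest⟩
    · simp only [PySem.Chars.splitOn.go, List.mem_reverse] at hp
      rcases List.mem_cons.mp hp with h | h
      · subst h; right; left; simpa using hc
      · right; right; exact List.mem_flatten.mpr ⟨p, h, hc⟩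
    · simp only [PySem.Chars.splitOn.go] at hp
      split at hp
      · rcases ih _ _ _ _ hp c hc with h | h | h
        · left; exact List.drop_subset _ _ h
        · cases h
        · rcases List.mem_flatten.mp h with ⟨q, hq, hcq⟩
          rcases List.mem_cons.mp hq with h' | h'
          · subst h'; right; left; simpa using hcq
          · right; right; exact List.mem_flatten.mpr ⟨q, h', hcq⟩
      · rcases ih _ _ _ _ hp c hc with h | h | h
        · left; exact List.mem_cons_of_mem _ h
        · rcases List.mem_cons.mp h with h' | h'
          · subst h'; left; exact List.mem_cons_self
          · right; left; exact h'
        · right; right; exact h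

lemma splitOn_chars {l sep p : List Char} (hp : p ∈ PySem.Chars.splitOn l sep) {c : Char} (hc : c ∈ p) :
    c ∈ l := by
  have h := splitOn_go_chars sep (l.length + 1) l [] [] p hp c hc
  simpa using h

-- ===== VERDICT (by name: the statement is the Claim_ definition above) =====
theorem verify_packet_spec : Claim_equal_verify_packet := by
  unfold Claim_equal_verify_packet
  intro packet hdom
  unfold Spec_verify_packet verify_packet verify_packet_alt
  rcases hP : PySem.Chars.splitOn packet.toList ['|'] with _ | ⟨m, _ | ⟨cr, rest⟩⟩
  · rfl
  · rfl
  rcases rest with _ | ⟨x, rest'⟩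
  case cons.cons.cons => rfl
  have hm128 : ∀ ch ∈ m, ch.toNat < 128 := by
    intro ch hch
    have hmem : ch ∈ packet.toList :=
      splitOn_chars (l := packet.toList) (sep := ['|']) (p := m) (by rw [hP]; simp) hch
    have hdc : pvDomChar ch = true := by
      unfold Dom_verify_packet pvDomStr at hdom
      exact List.all_eq_true.mp hdom ch hmem
    unfold pvDomChar at hdc
    simp only [Bool.or_eq_true, Bool.and_eq_true, decide_eq_true_eq, beq_iff_eq] at hdc
    omega
  have hbin : IsBin ((m.map (fun c => pvAFormat c.toNat 8)).flatten) := by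
    intro c hc
    rcases List.mem_flatten.mp hc with ⟨q, hq, hcq⟩
    rcases List.mem_map.mp hq with ⟨ch, _, rfl⟩
    exact pvAFormat_bin _ _ c hcq
  show (if crc_division _ == cr then _ else _) = _
  have hcore : ∀ fuel n acc, pvBBinCore fuel n acc = pvABinCore fuel n acc := by
    intro fuel
    induction fuel with
    | zero => intro n acc; rfl
    | succ f ihf =>
      intro n acc
      unfold pvBBinCore pvABinCore
      split
      · rfl
      · exact ihf _ _
  have hfmt : ∀ n w : Nat, pvBFormat n w = pvAFormat n w := by
    intro n w
    unfold pvBFormat pvAFormat pvBBin pvABin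
    rw [hcore]
  rw [crc_division_eq _ hbin, ← remB_eq m hm128, ← hfmt]
  rfl
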